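-- pv_equiv track=rewrite | github.com/ashengaout/Qualcomm-Procesor-Design | Hardware/Kmap.py | greedy_cover
-- ===== SOURCE A (Python) =====
-- from itertools import combinations
--
-- def _is_power_of_two(x: int) -> bool:
--     return x > 0 and (x & (x - 1)) == 0
--
-- def is_valid(minterms_in_group: list[int], n: int) -> bool:
--     size = len(minterms_in_group)
--     if not _is_power_of_two(size):
--         return False
--
--     # XOR every pair — all differences must be covered by a single mask
--     xor_acc = 0
--     for a, b in combinations(minterms_in_group, 2):
--         xor_acc |= (a ^ b)
--
--     # xor_accumulate must itself be a power-of-two - 1  (i.e. 0b0..01..1)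
--     mask = xor_acc
--     if mask == 0 and size == 1:
--         return True
--
--     if not _is_power_of_two(mask + 1):
--         return False
--
--     # Verify every minterm in the group is reachable via the mask from the first
--     base = minterms_in_group[0]
--     exp = set()
--     for combo in range(mask + 1):
--         if (combo & ~mask) == 0:
--             exp.add(base | combo)
--     return set(minterms_in_group) == exp
--
-- def greedy_cover(targets: list[int], n: int) -> list[list[int]]:
--     candidates = []
--     for size in [8, 4, 2, 1]:
--         if size > len(targets):
--             continue
--         for group in combinations(targets, size):
--             group = list(group)
--             if is_valid(group, n):
--                 candidates.append(group)
--
--     candidates.sort(key=lambda g: (-len(g), g[0]))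
--
--     covered = set()
--     groups_used = []
--     for group in candidates:
--         if any(m not in covered for m in group):
--             groups_used.append(group)
--             covered.update(group)
--         if covered == set(targets):
--             break
--
--     return groups_used
-- ===== SOURCE B (Python) =====
-- def greedy_cover(targets: list[int], n: int) -> list[list[int]]:
--     # A valid K-map group here is a run of 2**k consecutive minterms starting at a
--     # multiple of 2**k, listed in targets order and led by its smallest member.
--     # Probe each target as a possible block start instead of enumerating all
--     # combinations of targets.
--     tset = set(targets)
--     out = []
--     covered = set()
--     for size in (8, 4, 2):
--         starts = sorted(t for t in tset
--                         if t % size == 0 and all(t + d in tset for d in range(1, size)))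
--         for b in starts:
--             group = [x for x in targets if b <= x < b + size]
--             if group[0] == b and any(m not in covered for m in group):
--                 out.append(group)
--                 covered.update(group)
--     for t in sorted(tset):
--         if t not in covered:
--             out.append([t])
--             covered.add(t)
--     return out
-- ===== Notes on version B (the rewrite author's own statement) =====
-- stated objective: faster
-- what changed: B replaces A's enumeration of all 1/2/4/8-element combinations of targets (with a per-group pairwise-xor/mask-enumeration validity check) by directly probing each target as the start of an aligned run of 2^k consecutive minterms via set membership, emitting the runs in ascending-start order per size, which reproduces A's sort key (-len, g[0]). Pre_ excludes targets lists with duplicate entries, on which A's positional enumeration of combinations of equal values yields accidental candidate groups repeating a minterm (e.g. [5,5]) — a degenerate corner neither behaviour is specified for.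
-- outside the precondition, e.g. on greedy_cover([5, 5], 0): A returns [[5, 5]], B returns [[5]]; on greedy_cover([0, 1, 0], 0): A returns [[0, 1]], B returns [[0, 1, 0]]
import Mathlib
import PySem

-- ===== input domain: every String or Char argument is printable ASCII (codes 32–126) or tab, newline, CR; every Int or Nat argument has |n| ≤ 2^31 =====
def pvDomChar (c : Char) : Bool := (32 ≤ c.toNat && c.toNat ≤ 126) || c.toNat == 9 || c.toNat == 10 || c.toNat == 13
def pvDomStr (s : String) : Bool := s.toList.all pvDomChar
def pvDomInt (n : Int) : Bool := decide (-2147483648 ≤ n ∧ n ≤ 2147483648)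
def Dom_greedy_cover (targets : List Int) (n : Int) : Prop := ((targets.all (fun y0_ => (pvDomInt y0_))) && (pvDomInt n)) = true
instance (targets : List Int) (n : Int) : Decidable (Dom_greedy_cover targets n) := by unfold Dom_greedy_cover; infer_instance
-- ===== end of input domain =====

-- B probes each target as the start of an aligned run of 2^k consecutive minterms (set
-- membership) instead of enumerating all 1/2/4/8-element combinations of targets: faster.

-- ===== PORT A =====
def pvIsPow2 (x : Int) : Bool := decide (0 < x) && (PySem.Int.band x (x - 1) == 0)

-- port of helper is_valid (parameter n is unused by the Python too)
def is_valid (minterms_in_group : List Int) (n : Int) : Bool :=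
  let size : Int := PySem.List.len minterms_in_group
  if !pvIsPow2 size then false
  else
    -- xor_acc |= a ^ b over combinations(minterms_in_group, 2)
    let xor_acc : Int := (PySem.List.combinations minterms_in_group 2).foldl
      (fun acc p => match p with
        | [a, b] => PySem.Int.bor acc (PySem.Int.bxor a b)
        | _ => acc)  -- combinations _ 2 only yields 2-element lists
      0
    let mask := xor_acc
    if mask == 0 && size == 1 then true
    else if !pvIsPow2 (mask + 1) then false
    else
      let base := PySem.List.pyGetD minterms_in_group 0 0  -- g[0]; nonempty whenever reached
      let exp : PySem.Set Int := (PySem.List.pyRange 0 (mask + 1) 1).foldl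
        (fun s c => if PySem.Int.band c (Int.not mask) == 0 then PySem.Set.add s (PySem.Int.bor base c) else s)
        PySem.Set.empty
      PySem.Set.equal (PySem.Set.ofList minterms_in_group) exp

-- the greedy loop of A, with its break
def greedyLoopA (targets : List Int) : List (List Int) → PySem.Set Int → List (List Int) → List (List Int)
  | [], _cov, used => used
  | g :: rest, cov, used =>
    let st : List (List Int) × PySem.Set Int :=
      if g.any (fun m => !(PySem.Set.contains cov m)) then (used ++ [g], PySem.Set.update cov g)
      else (used, cov)
    if PySem.Set.equal st.2 (PySem.Set.ofList targets) then st.1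
    else greedyLoopA targets rest st.2 st.1

def greedy_cover (targets : List Int) (n : Int) : List (List Int) :=
  let candidates : List (List Int) :=
    ([8, 4, 2, 1] : List Int).foldl
      (fun cand size =>
        if decide (PySem.List.len targets < size) then cand
        else (PySem.List.combinations targets size.toNat).foldl
          (fun cand g => if is_valid g n then cand ++ [g] else cand) cand)
      []
  let sortedCands := PySem.List.sorted2 candidates
    (fun g => -(PySem.List.len g)) (fun g => PySem.List.pyGetD g 0 0)
  greedyLoopA targets sortedCands PySem.Set.empty []

-- ===== PORT B =====
-- group = [x for x in targets if b <= x < b + size]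
def pvBlock (targets : List Int) (b s : Int) : List Int :=
  targets.filter (fun x => decide (b ≤ x ∧ x < b + s))

-- starts = those t in tset with t % size == 0 and all of t+1 .. t+size-1 present
def pvStarts (tset : PySem.Set Int) (s : Int) : List Int :=
  tset.filter (fun t => (PySem.Int.mod t s == 0) &&
    (PySem.List.pyRange 1 s 1).all (fun d => PySem.Set.contains tset (t + d)))

-- one pass of B's outer loop, for one group size s
def pvSizeStep (targets : List Int) (tset : PySem.Set Int) (s : Int)
    (st : List (List Int) × PySem.Set Int) : List (List Int) × PySem.Set Int :=
  (PySem.List.sorted (pvStarts tset s) (fun t => t)).foldl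
    (fun st b =>
      let group := pvBlock targets b s
      if (PySem.List.pyGetD group 0 0 == b) && group.any (fun m => !(PySem.Set.contains st.2 m))
      then (st.1 ++ [group], PySem.Set.update st.2 group)
      else st) st

def greedy_cover_alt (targets : List Int) (n : Int) : List (List Int) :=
  let tset := PySem.Set.ofList targets
  let st := ([8, 4, 2] : List Int).foldl (fun st s => pvSizeStep targets tset s st)
    ([], PySem.Set.empty)
  let fin := (PySem.List.sorted tset (fun t => t)).foldl
    (fun st t => if !(PySem.Set.contains st.2 t) then (st.1 ++ [[t]], PySem.Set.add st.2 t) else st) st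
  fin.1

-- ===== PRECONDITION & SPEC =====
-- Pre_ excludes targets lists with duplicate entries, on which A's positional enumeration of
-- combinations of equal values yields accidental candidate groups repeating a minterm
-- (e.g. [5,5] on input [5,5]) — a degenerate corner neither behaviour is specified for.
def Pre_greedy_cover (targets : List Int) (n : Int) : Prop := targets.Nodup
instance (targets : List Int) (n : Int) : Decidable (Pre_greedy_cover targets n) := by
  unfold Pre_greedy_cover; infer_instance
def pvWitness_greedy_cover : List Int × Int := ([0, 1, 2, 5], 4)

def Spec_greedy_cover (targets : List Int) (n : Int) (out : List (List Int)) : Prop := out = greedy_cover_alt targets n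
instance (targets : List Int) (n : Int) (out : List (List Int)) : Decidable (Spec_greedy_cover targets n out) := by unfold Spec_greedy_cover; infer_instance

-- ===== CLAIM (what is proved, stated in full; the proofs are below) =====
def Claim_equal_greedy_cover : Prop := ∀ (targets : List Int) (n : Int), Dom_greedy_cover targets n → Pre_greedy_cover targets n → Spec_greedy_cover targets n (greedy_cover targets n)

-- ===== LEMMAS AND PROOFS =====

-- x &&& y = 0 → x + y = x ||| y
theorem pvAddOr : ∀ (x y : Nat), x &&& y = 0 → x + y = x ||| y := by
  intro x
  induction x using Nat.binaryRec with
  | zero => simp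
  | bit b n ih =>
    intro y h
    cases y using Nat.bitCasesOn with
    | bit c m =>
      rw [Nat.land_bit, Nat.bit_eq_zero_iff] at h
      have hsum : n + m = n ||| m := ih _ h.1
      rw [Nat.lor_bit, Nat.bit_val, Nat.bit_val, Nat.bit_val]
      cases b <;> cases c
      · simp only [Bool.or_self, Bool.toNat_false]; omega
      · simp only [Bool.false_or, Bool.toNat_false, Bool.toNat_true]; omega
      · simp only [Bool.or_false, Bool.toNat_false, Bool.toNat_true]; omega
      · exact absurd h.2 (by simp)

-- m - (m &&& k) = m.ldiff k
theorem pvSubAnd (m k : Nat) : m - (m &&& k) = m.ldiff k := by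
  have hdis : (m.ldiff k) &&& (m &&& k) = 0 := by
    apply Nat.eq_of_testBit_eq; intro i
    simp [Nat.testBit_land, Nat.testBit_ldiff]
    cases m.testBit i <;> cases k.testBit i <;> simp
  have hor : (m.ldiff k) ||| (m &&& k) = m := by
    apply Nat.eq_of_testBit_eq; intro i
    simp [Nat.testBit_lor, Nat.testBit_land, Nat.testBit_ldiff]
    cases m.testBit i <;> cases k.testBit i <;> simp
  have := pvAddOr (m.ldiff k) (m &&& k) hdis
  omega

-- power-of-two characterisation of x > 0 with x &&& (x-1) = 0
theorem pvPow2Char : ∀ (x : Nat), 0 < x → x &&& (x - 1) = 0 → ∃ k, x = 2 ^ k := by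
  intro x
  induction x using Nat.binaryRec with
  | zero => omega
  | bit b n ih =>
    intro hpos h
    cases b with
    | true =>
      -- x = 2n+1 odd; if n = 0 then x = 1 = 2^0 else x &&& (x-1) = 2n ≠ 0
      rcases Nat.eq_zero_or_pos n with h0 | hn
      · exact ⟨0, by simp [h0, Nat.bit_val]⟩
      · exfalso
        have hx : Nat.bit true n = 2 * n + 1 := Nat.bit_val true n
        have : (2 * n + 1) &&& (2 * n) = 2 * n := by
          have : (2 * n + 1) = Nat.bit true n := (Nat.bit_val true n).symm
          have h2n : (2 * n) = Nat.bit false n := by simp [Nat.bit_val]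
          rw [this, h2n, Nat.land_bit]
          simp [Nat.bit_val]
        rw [hx] at h
        simp at h
        omega
    | false =>
      -- x = 2n even, n > 0; (2n) &&& (2n-1) = 2*(n &&& (n-1)) ... via bits
      have hx : Nat.bit false n = 2 * n := Nat.bit_val false n ▸ by simp [Nat.bit_val]
      have hn : 0 < n := by
        rcases Nat.eq_zero_or_pos n with h0 | hn
        · rw [hx] at hpos; omega
        · exact hn
      have key : n &&& (n - 1) = 0 := by
        have h1 : 2 * n - 1 = Nat.bit true (n - 1) := by rw [Nat.bit_val]; simp; omega
        rw [hx, h1] at h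
        have h2 : 2 * n = Nat.bit false n := by simp [Nat.bit_val]
        rw [h2, Nat.land_bit] at h
        rw [Nat.bit_eq_zero_iff] at h
        exact h.1
      obtain ⟨k, hk⟩ := ih hn key
      exact ⟨k + 1, by rw [hx, hk]; ring⟩

-- ===== Int-level toolkit =====
theorem pvIntExt {a b : Int} (h : ∀ i, a.testBit i = b.testBit i) : a = b := by
  cases a with
  | ofNat m =>
    cases b with
    | ofNat n =>
      congr 1
      exact Nat.eq_of_testBit_eq (fun i => h i)
    | negSucc n =>
      exfalso
      have hi := h (m + n)
      have h1 : m.testBit (m + n) = false := Nat.testBit_lt_two_pow (by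
        calc m < 2 ^ m := Nat.lt_two_pow_self
        _ ≤ 2 ^ (m + n) := Nat.pow_le_pow_right (by omega) (by omega))
      have h2 : n.testBit (m + n) = false := Nat.testBit_lt_two_pow (by
        calc n < 2 ^ n := Nat.lt_two_pow_self
        _ ≤ 2 ^ (m + n) := Nat.pow_le_pow_right (by omega) (by omega))
      simp [Int.testBit, h1, h2] at hi
  | negSucc m =>
    cases b with
    | ofNat n =>
      exfalso
      have hi := h (m + n)
      have h1 : m.testBit (m + n) = false := Nat.testBit_lt_two_pow (by
        calc m < 2 ^ m := Nat.lt_two_pow_self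
        _ ≤ 2 ^ (m + n) := Nat.pow_le_pow_right (by omega) (by omega))
      have h2 : n.testBit (m + n) = false := Nat.testBit_lt_two_pow (by
        calc n < 2 ^ n := Nat.lt_two_pow_self
        _ ≤ 2 ^ (m + n) := Nat.pow_le_pow_right (by omega) (by omega))
      simp [Int.testBit, h1, h2] at hi
    | negSucc n =>
      have : m = n := Nat.eq_of_testBit_eq (fun i => by
        have := h i
        simpa [Int.testBit] using this)
      rw [this]

theorem pvBandEq (a b : Int) : PySem.Int.band a b = Int.land a b := by
  cases a with
  | ofNat m =>
    cases b with
    | ofNat n => simp [PySem.Int.band, Int.land]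
    | negSucc n =>
      show (if 0 ≤ Int.ofNat m then if 0 ≤ Int.negSucc n then _ else _ else _) = _
      rw [if_pos (by exact Int.ofNat_nonneg m), if_neg (by simp)]
      show (↑(Int.toNat ↑m - (Int.toNat ↑m &&& Int.toNat (-Int.negSucc n - 1))) : Int) = ↑(m.ldiff n)
      have h1 : Int.toNat (↑m) = m := rfl
      have h2 : -Int.negSucc n - 1 = (n : Int) := by
        simp [Int.negSucc_eq]; try ring
      rw [h1, h2]
      norm_num [pvSubAnd]
  | negSucc m =>
    cases b with
    | ofNat n =>
      show (if 0 ≤ Int.negSucc m then _ else if 0 ≤ Int.ofNat n then _ else _) = _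
      rw [if_neg (by simp), if_pos (by exact Int.ofNat_nonneg n)]
      show (↑(Int.toNat ↑n - (Int.toNat ↑n &&& Int.toNat (-Int.negSucc m - 1))) : Int) = ↑(n.ldiff m)
      have h2 : -Int.negSucc m - 1 = (m : Int) := by simp [Int.negSucc_eq]; try ring
      rw [h2]
      norm_num [pvSubAnd]
    | negSucc n =>
      show (if 0 ≤ Int.negSucc m then _ else if 0 ≤ Int.negSucc n then _ else _) = _
      rw [if_neg (by simp), if_neg (by simp)]
      show -(↑(Int.toNat (-Int.negSucc m - 1) ||| Int.toNat (-Int.negSucc n - 1)) : Int) - 1 = Int.negSucc (m ||| n)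
      have h2 : -Int.negSucc m - 1 = (m : Int) := by simp [Int.negSucc_eq]; try ring
      have h3 : -Int.negSucc n - 1 = (n : Int) := by simp [Int.negSucc_eq]; try ring
      rw [h2, h3]
      simp [Int.negSucc_eq]
      ring

theorem pvBorEq (a b : Int) : PySem.Int.bor a b = Int.lor a b := by
  cases a with
  | ofNat m =>
    cases b with
    | ofNat n => simp [PySem.Int.bor, Int.lor]
    | negSucc n =>
      show (if 0 ≤ Int.ofNat m then if 0 ≤ Int.negSucc n then _ else _ else _) = _
      rw [if_pos (by exact Int.natCast_nonneg m), if_neg (by simp)]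
      show -(↑(Int.toNat (-Int.negSucc n - 1) - (Int.toNat (-Int.negSucc n - 1) &&& Int.toNat ↑m)) : Int) - 1 = Int.negSucc (n.ldiff m)
      have h2 : -Int.negSucc n - 1 = (n : Int) := by simp [Int.negSucc_eq]; try ring
      rw [h2]
      simp [Int.negSucc_eq, pvSubAnd]
      try ring
  | negSucc m =>
    cases b with
    | ofNat n =>
      show (if 0 ≤ Int.negSucc m then _ else if 0 ≤ Int.ofNat n then _ else _) = _
      rw [if_neg (by simp), if_pos (by exact Int.natCast_nonneg n)]
      show -(↑(Int.toNat (-Int.negSucc m - 1) - (Int.toNat (-Int.negSucc m - 1) &&& Int.toNat ↑n)) : Int) - 1 = Int.negSucc (m.ldiff n)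
      have h2 : -Int.negSucc m - 1 = (m : Int) := by simp [Int.negSucc_eq]; try ring
      rw [h2]
      simp [Int.negSucc_eq, pvSubAnd]
      try ring
    | negSucc n =>
      show (if 0 ≤ Int.negSucc m then _ else if 0 ≤ Int.negSucc n then _ else _) = _
      rw [if_neg (by simp), if_neg (by simp)]
      show -(↑(Int.toNat (-Int.negSucc m - 1) &&& Int.toNat (-Int.negSucc n - 1)) : Int) - 1 = Int.negSucc (m &&& n)
      have h2 : -Int.negSucc m - 1 = (m : Int) := by simp [Int.negSucc_eq]; try ring
      have h3 : -Int.negSucc n - 1 = (n : Int) := by simp [Int.negSucc_eq]; try ring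
      rw [h2, h3]
      simp [Int.negSucc_eq]
      try ring

theorem pvBxorEq (a b : Int) : PySem.Int.bxor a b = Int.xor a b := by
  cases a with
  | ofNat m =>
    cases b with
    | ofNat n => simp [PySem.Int.bxor, Int.xor]
    | negSucc n =>
      show (if 0 ≤ Int.ofNat m then if 0 ≤ Int.negSucc n then _ else _ else _) = _
      rw [if_pos (by exact Int.natCast_nonneg m), if_neg (by simp)]
      show -(↑(Int.toNat ↑m ^^^ Int.toNat (-Int.negSucc n - 1)) : Int) - 1 = Int.negSucc (m ^^^ n)
      have h2 : -Int.negSucc n - 1 = (n : Int) := by simp [Int.negSucc_eq]; try ring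
      rw [h2]
      simp [Int.negSucc_eq]
      try ring
  | negSucc m =>
    cases b with
    | ofNat n =>
      show (if 0 ≤ Int.negSucc m then _ else if 0 ≤ Int.ofNat n then _ else _) = _
      rw [if_neg (by simp), if_pos (by exact Int.natCast_nonneg n)]
      show -(↑(Int.toNat (-Int.negSucc m - 1) ^^^ Int.toNat ↑n) : Int) - 1 = Int.negSucc (m ^^^ n)
      have h2 : -Int.negSucc m - 1 = (m : Int) := by simp [Int.negSucc_eq]; try ring
      rw [h2]
      simp [Int.negSucc_eq]
      try ring
    | negSucc n =>
      show (if 0 ≤ Int.negSucc m then _ else if 0 ≤ Int.negSucc n then _ else _) = _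
      rw [if_neg (by simp), if_neg (by simp)]
      show (↑(Int.toNat (-Int.negSucc m - 1) ^^^ Int.toNat (-Int.negSucc n - 1)) : Int) = ↑(m ^^^ n)
      have h2 : -Int.negSucc m - 1 = (m : Int) := by simp [Int.negSucc_eq]; try ring
      have h3 : -Int.negSucc n - 1 = (n : Int) := by simp [Int.negSucc_eq]; try ring
      rw [h2, h3]
      simp

-- m % t = t - 1 when t divides m+1
theorem pvModPred (t m q : Nat) (ht : 0 < t) (h : m + 1 = t * q) : m % t = t - 1 := by
  rcases q with _ | q'
  · omega
  · have hm : m = (t - 1) + q' * t := by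
      have : t * (q' + 1) = t * q' + t := by ring
      rw [this] at h
      have : t * q' = q' * t := by ring
      omega
    rw [hm, Nat.add_mul_mod_self_right, Nat.mod_eq_of_lt (by omega)]

-- low bits of a multiple of 2^k are clear
theorem pvLowBitsFalse {a : Int} {k : Nat} (h : ((2:Int)^k) ∣ a) {i : Nat} (hik : i < k) :
    a.testBit i = false := by
  have hcast : ((2:Int)^k) = ((2^k : Nat) : Int) := by push_cast; ring
  rw [hcast] at h
  cases a with
  | ofNat m =>
    have hofnat : Int.ofNat m = ((m : Nat) : Int) := rfl
    rw [hofnat] at h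
    have hm : (2^k : Nat) ∣ m := Int.natCast_dvd_natCast.mp h
    have h0 : m % 2^k = 0 := Nat.dvd_iff_mod_eq_zero.mp hm
    have hb : m.testBit i = false := by
      have h2 := Nat.testBit_mod_two_pow m k i
      rw [h0] at h2
      simpa [hik] using h2.symm
    simpa [Int.testBit] using hb
  | negSucc m =>
    have hm : (2^k : Nat) ∣ (m + 1) := by
      have h2 : Int.negSucc m = -((m:Int) + 1) := by simp [Int.negSucc_eq]
      rw [h2] at h
      have h3 : ((2^k : Nat) : Int) ∣ ((m : Int) + 1) := dvd_neg.mp h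
      exact_mod_cast h3
    obtain ⟨q, hq⟩ := hm
    have h1 : m % 2^k = 2^k - 1 := pvModPred (2^k) m q (Nat.two_pow_pos k) hq
    have h2 : m.testBit i = true := by
      have h3 := Nat.testBit_mod_two_pow m k i
      rw [h1, Nat.testBit_two_pow_sub_one] at h3
      simpa [hik] using h3.symm
    simp [Int.testBit, h2]

-- bits at or above k of 0 ≤ c < 2^k are clear
theorem pvHighBitsFalse {c : Int} {k : Nat} (h0 : 0 ≤ c) (h : c < (2:Int)^k) {i : Nat}
    (hik : k ≤ i) : c.testBit i = false := by
  obtain ⟨m, rfl⟩ := Int.eq_ofNat_of_zero_le h0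
  have hm1 : (m:Int) < ((2^k : Nat) : Int) := by push_cast; exact_mod_cast h
  have h1 : m < 2^k := by exact_mod_cast hm1
  have hm : m < 2^i := lt_of_lt_of_le h1 (Nat.pow_le_pow_right (by omega) hik)
  exact Nat.testBit_lt_two_pow hm

-- testBit of a natural-number cast
theorem pvTestBitCast (m : Nat) (i : Nat) : ((m : Int)).testBit i = m.testBit i := rfl

-- (2^k - 1 : Int).testBit i = decide (i < k)
theorem pvTestBitMaskOnes (k i : Nat) : ((2:Int)^k - 1).testBit i = decide (i < k) := by
  have h1 : (1:Int) ≤ 2^k := by exact_mod_cast Nat.one_le_two_pow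
  have hcast : ((2:Int)^k - 1) = ((2^k - 1 : Nat) : Int) := by
    push_cast [Nat.one_le_two_pow]
    ring
  rw [hcast, pvTestBitCast, Nat.testBit_two_pow_sub_one]

-- band a (2^k - 1) = a % 2^k  (Python %)
theorem pvBandMask (a : Int) (k : Nat) :
    PySem.Int.band a ((2:Int)^k - 1) = PySem.Int.mod a ((2:Int)^k) := by
  have hpos : (0:Int) < 2^k := by positivity
  have hone : (1:Nat) ≤ 2^k := Nat.one_le_two_pow
  rw [PySem.Int.mod_eq_emod_of_pos hpos, pvBandEq]
  have hcast : ((2:Int)^k - 1) = ((2^k - 1 : Nat) : Int) := by push_cast [Nat.one_le_two_pow]; ring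
  rw [hcast]
  cases a with
  | ofNat m =>
    have hl : Int.land (Int.ofNat m) ((2^k - 1 : Nat) : Int) = Int.ofNat (m &&& (2^k - 1)) := rfl
    rw [hl, Nat.and_two_pow_sub_one_eq_mod]
    show ((m % 2^k : Nat) : Int) = ((m : Nat) : Int) % (2:Int)^k
    push_cast
    ring
  | negSucc m =>
    have hl : Int.land (Int.negSucc m) ((2^k - 1 : Nat) : Int) = Int.ofNat ((2^k - 1).ldiff m) := rfl
    rw [hl]
    have hld : (2^k - 1).ldiff m = 2^k - 1 - m % 2^k := by
      rw [← pvSubAnd, Nat.land_comm, Nat.and_two_pow_sub_one_eq_mod]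
    rw [hld]
    set r := m % 2^k with hr
    have hrlt : r < 2^k := Nat.mod_lt _ (by omega)
    have hdecomp : Int.negSucc m = ((2:Int)^k - 1 - r) + (2:Int)^k * (-(((m / 2^k : Nat) : Int) + 1)) := by
      have hmr : (m : Int) = ((2^k : Nat) : Int) * ((m / 2^k : Nat) : Int) + (r : Int) := by
        exact_mod_cast congrArg (Nat.cast : Nat → Int) (Nat.div_add_mod m (2^k)).symm
      rw [Int.negSucc_eq, hmr]
      push_cast
      ring
    rw [hdecomp, Int.add_mul_emod_self_left, Int.emod_eq_of_lt (by push_cast; omega) (by push_cast; omega)]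
    have : Int.ofNat (2^k - 1 - r) = ((2^k - 1 - r : Nat) : Int) := rfl
    rw [this]
    push_cast [hone]
    omega

-- a multiple of 2^k or-ed with 0 ≤ c < 2^k is their sum
theorem pvBorAdd {a c : Int} {k : Nat} (hdvd : ((2:Int)^k) ∣ a) (h0 : 0 ≤ c)
    (hlt : c < (2:Int)^k) : PySem.Int.bor a c = a + c := by
  rw [pvBorEq]
  obtain ⟨cn, rfl⟩ := Int.eq_ofNat_of_zero_le h0
  have hcn : cn < 2^k := by exact_mod_cast (by push_cast at hlt ⊢; exact_mod_cast hlt : (cn:Int) < ((2^k:Nat):Int))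
  cases a with
  | ofNat m =>
    have hdis : m &&& cn = 0 := by
      apply Nat.eq_of_testBit_eq
      intro i
      simp only [Nat.testBit_land, Nat.zero_testBit]
      by_cases hik : i < k
      · have : (Int.ofNat m).testBit i = false := pvLowBitsFalse hdvd hik
        simp [Int.testBit] at this
        simp [this]
      · have : cn.testBit i = false := Nat.testBit_lt_two_pow
          (lt_of_lt_of_le hcn (Nat.pow_le_pow_right (by omega) (by omega)))
        simp [this]
    have hl : Int.lor (Int.ofNat m) ((cn:Nat):Int) = Int.ofNat (m ||| cn) := rfl
    rw [hl, ← pvAddOr m cn hdis]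
    rfl
  | negSucc m =>
    have hsub : m &&& cn = cn := by
      apply Nat.eq_of_testBit_eq
      intro i
      simp only [Nat.testBit_land]
      by_cases hik : i < k
      · have : (Int.negSucc m).testBit i = false := pvLowBitsFalse hdvd hik
        simp [Int.testBit] at this
        simp [this]
      · have : cn.testBit i = false := Nat.testBit_lt_two_pow
          (lt_of_lt_of_le hcn (Nat.pow_le_pow_right (by omega) (by omega)))
        simp [this]
    have hcm : cn ≤ m := by
      have hm : (2^k : Nat) ∣ (m + 1) := by
        have h2 : Int.negSucc m = -((m:Int) + 1) := by simp [Int.negSucc_eq]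
        rw [h2] at hdvd
        have hcast : ((2:Int)^k) = ((2^k : Nat) : Int) := by push_cast; ring
        rw [hcast] at hdvd
        have h3 : ((2^k : Nat) : Int) ∣ ((m : Int) + 1) := dvd_neg.mp hdvd
        exact_mod_cast h3
      have := Nat.le_of_dvd (by omega) hm
      omega
    have hl : Int.lor (Int.negSucc m) ((cn:Nat):Int) = Int.negSucc (m.ldiff cn) := rfl
    rw [hl]
    have hld : m.ldiff cn = m - cn := by rw [← pvSubAnd, hsub]
    rw [hld, Int.negSucc_eq, Int.negSucc_eq]
    push_cast [hcm]
    ring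

-- xor within an aligned block ignores the base
theorem pvXorShift {a d1 d2 : Int} {k : Nat} (hdvd : ((2:Int)^k) ∣ a)
    (h1 : 0 ≤ d1) (h1' : d1 < (2:Int)^k) (h2 : 0 ≤ d2) (h2' : d2 < (2:Int)^k) :
    PySem.Int.bxor (a + d1) (a + d2) = PySem.Int.bxor d1 d2 := by
  rw [← pvBorAdd hdvd h1 h1', ← pvBorAdd hdvd h2 h2']
  rw [pvBxorEq, pvBxorEq, pvBorEq, pvBorEq]
  apply pvIntExt
  intro i
  simp only [Int.testBit_lxor, Int.testBit_lor]
  by_cases hik : i < k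
  · have ha : a.testBit i = false := pvLowBitsFalse hdvd hik
    simp [ha]
  · have hd1 : d1.testBit i = false := pvHighBitsFalse h1 h1' (by omega)
    have hd2 : d2.testBit i = false := pvHighBitsFalse h2 h2' (by omega)
    simp [hd1, hd2]

-- closure of [0, 2^k) under bor and bxor
theorem pvBorClosure {x y : Int} {k : Nat} (hx0 : 0 ≤ x) (hx : x < (2:Int)^k)
    (hy0 : 0 ≤ y) (hy : y < (2:Int)^k) :
    0 ≤ PySem.Int.bor x y ∧ PySem.Int.bor x y < (2:Int)^k := by
  obtain ⟨m, rfl⟩ := Int.eq_ofNat_of_zero_le hx0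
  obtain ⟨n, rfl⟩ := Int.eq_ofNat_of_zero_le hy0
  rw [pvBorEq]
  have hl : Int.lor ((m:Nat):Int) ((n:Nat):Int) = ((m ||| n : Nat) : Int) := rfl
  rw [hl]
  have hm : m < 2^k := by exact_mod_cast (by push_cast at hx ⊢; exact_mod_cast hx : (m:Int) < ((2^k:Nat):Int))
  have hn : n < 2^k := by exact_mod_cast (by push_cast at hy ⊢; exact_mod_cast hy : (n:Int) < ((2^k:Nat):Int))
  have hlt : (m ||| n) < 2^k := by
    have heq : (m ||| n) &&& (2^k - 1) = m ||| n := by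
      apply Nat.eq_of_testBit_eq
      intro i
      simp only [Nat.testBit_land, Nat.testBit_lor, Nat.testBit_two_pow_sub_one]
      by_cases hik : i < k
      · simp [hik]
      · have h1 : m.testBit i = false := Nat.testBit_lt_two_pow
          (lt_of_lt_of_le hm (Nat.pow_le_pow_right (by omega) (by omega)))
        have h2 : n.testBit i = false := Nat.testBit_lt_two_pow
          (lt_of_lt_of_le hn (Nat.pow_le_pow_right (by omega) (by omega)))
        simp [h1, h2]
    rw [Nat.and_two_pow_sub_one_eq_mod] at heq
    have := Nat.mod_lt (m ||| n) (show 0 < 2^k by positivity)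
    omega
  constructor
  · exact Int.natCast_nonneg _
  · exact_mod_cast (by push_cast; exact_mod_cast hlt : ((m ||| n : Nat) : Int) < ((2^k:Nat):Int))

theorem pvBxorClosure {x y : Int} {k : Nat} (hx0 : 0 ≤ x) (hx : x < (2:Int)^k)
    (hy0 : 0 ≤ y) (hy : y < (2:Int)^k) :
    0 ≤ PySem.Int.bxor x y ∧ PySem.Int.bxor x y < (2:Int)^k := by
  obtain ⟨m, rfl⟩ := Int.eq_ofNat_of_zero_le hx0
  obtain ⟨n, rfl⟩ := Int.eq_ofNat_of_zero_le hy0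
  rw [pvBxorEq]
  have hl : Int.xor ((m:Nat):Int) ((n:Nat):Int) = ((m ^^^ n : Nat) : Int) := rfl
  rw [hl]
  have hm : m < 2^k := by exact_mod_cast (by push_cast at hx ⊢; exact_mod_cast hx : (m:Int) < ((2^k:Nat):Int))
  have hn : n < 2^k := by exact_mod_cast (by push_cast at hy ⊢; exact_mod_cast hy : (n:Int) < ((2^k:Nat):Int))
  have hlt : (m ^^^ n) < 2^k := by
    have heq : (m ^^^ n) &&& (2^k - 1) = m ^^^ n := by
      apply Nat.eq_of_testBit_eq
      intro i
      simp only [Nat.testBit_land, Nat.testBit_xor, Nat.testBit_two_pow_sub_one]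
      by_cases hik : i < k
      · simp [hik]
      · have h1 : m.testBit i = false := Nat.testBit_lt_two_pow
          (lt_of_lt_of_le hm (Nat.pow_le_pow_right (by omega) (by omega)))
        have h2 : n.testBit i = false := Nat.testBit_lt_two_pow
          (lt_of_lt_of_le hn (Nat.pow_le_pow_right (by omega) (by omega)))
        simp [h1, h2]
    rw [Nat.and_two_pow_sub_one_eq_mod] at heq
    have := Nat.mod_lt (m ^^^ n) (show 0 < 2^k by positivity)
    omega
  constructor
  · exact Int.natCast_nonneg _
  · exact_mod_cast (by push_cast; exact_mod_cast hlt : ((m ^^^ n : Nat) : Int) < ((2^k:Nat):Int))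

-- (x|a)^(y|a) has no bits in common with a
theorem pvXorBorBandSelf (a c1 c2 : Int) :
    PySem.Int.band (PySem.Int.bxor (PySem.Int.bor a c1) (PySem.Int.bor a c2)) a = 0 := by
  rw [pvBandEq, pvBxorEq, pvBorEq, pvBorEq]
  apply pvIntExt
  intro i
  simp only [Int.testBit_land, Int.testBit_lxor, Int.testBit_lor]
  cases ha : a.testBit i <;> cases c1.testBit i <;> cases c2.testBit i <;> simp [Int.testBit]

-- band distributes over bor
theorem pvBandBorDistrib (p q x : Int) :
    PySem.Int.band (PySem.Int.bor p q) x = PySem.Int.bor (PySem.Int.band p x) (PySem.Int.band q x) := by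
  rw [pvBandEq, pvBorEq, pvBorEq, pvBandEq, pvBandEq]
  apply pvIntExt
  intro i
  simp only [Int.testBit_land, Int.testBit_lor]
  cases p.testBit i <;> cases q.testBit i <;> cases x.testBit i <;> simp

-- absorption: if x's bits lie in w they lie in w | u
theorem pvBandMono {x w : Int} (u : Int) (h : PySem.Int.band x w = x) :
    PySem.Int.band x (PySem.Int.bor w u) = x := by
  rw [pvBandEq, pvBorEq]
  rw [pvBandEq] at h
  apply pvIntExt
  intro i
  have hbit := congrArg (fun z => z.testBit i) h
  simp only [Int.testBit_land] at hbit
  simp only [Int.testBit_land, Int.testBit_lor]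
  cases hw : w.testBit i
  · simp [hw] at hbit
    simp [hbit]
  · cases hx : x.testBit i <;> simp

-- x's bits lie in w | x
theorem pvBandBorSelf (x w : Int) : PySem.Int.band x (PySem.Int.bor w x) = x := by
  rw [pvBandEq, pvBorEq]
  apply pvIntExt
  intro i
  simp only [Int.testBit_land, Int.testBit_lor]
  cases x.testBit i <;> simp

-- a value in [0,2^k) whose bits include every 2^i, i < k, is 2^k - 1
theorem pvAllBitsSet {m : Int} {k : Nat} (h0 : 0 ≤ m) (hlt : m < (2:Int)^k)
    (h : ∀ i < k, PySem.Int.band ((2:Int)^i) m = (2:Int)^i) : m = (2:Int)^k - 1 := by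
  apply pvIntExt
  intro i
  rw [pvTestBitMaskOnes]
  by_cases hik : i < k
  · have hbit := congrArg (fun z => z.testBit i) (h i hik)
    rw [pvBandEq] at hbit
    simp only [Int.testBit_land] at hbit
    have hpow : ((2:Int)^i).testBit i = true := by
      have hcast : ((2:Int)^i) = ((2^i : Nat) : Int) := by push_cast; ring
      rw [hcast, pvTestBitCast]
      simp [Nat.testBit_two_pow_self]
    rw [hpow] at hbit
    simp at hbit
    simp [hbit, hik]
  · simp [pvHighBitsFalse h0 hlt (by omega : k ≤ i), hik]

theorem pvTestBitZero (i : Nat) : (0:Int).testBit i = false := by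
  show (Int.ofNat 0).testBit i = false
  simp [Int.testBit]

-- band c ~(2^j - 1) = 0 for 0 ≤ c < 2^j
theorem pvBandNotMask {c : Int} {j : Nat} (h0 : 0 ≤ c) (hlt : c < (2:Int)^j) :
    PySem.Int.band c (Int.not ((2:Int)^j - 1)) = 0 := by
  rw [pvBandEq]
  have hnot : Int.not ((2:Int)^j - 1) = Int.lnot ((2:Int)^j - 1) := rfl
  rw [hnot]
  apply pvIntExt
  intro i
  simp only [Int.testBit_land, Int.testBit_lnot, pvTestBitMaskOnes]
  by_cases hij : i < j
  · simp [hij, Int.testBit, pvTestBitZero]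
  · simp [pvHighBitsFalse h0 hlt (by omega : j ≤ i), hij, pvTestBitZero]

-- pvIsPow2 facts

theorem pvIsPow2True (k : Nat) : pvIsPow2 ((2:Int)^k) = true := by
  unfold pvIsPow2
  have hpos : (0:Int) < 2^k := by positivity
  rw [pvBandMask]
  simp [hpos, PySem.Int.mod_eq_zero_iff_dvd]

theorem pvIsPow2Char {x : Int} (h : pvIsPow2 x = true) : ∃ k : Nat, x = (2:Int)^k := by
  unfold pvIsPow2 at h
  simp only [Bool.and_eq_true, decide_eq_true_eq, beq_iff_eq] at h
  obtain ⟨hpos, hband⟩ := h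
  obtain ⟨m, rfl⟩ := Int.eq_ofNat_of_zero_le (le_of_lt hpos)
  have hm : 0 < m := by exact_mod_cast hpos
  have hsub : ((m:Nat):Int) - 1 = ((m - 1 : Nat) : Int) := by push_cast [hm]; omega
  rw [hsub, pvBandEq] at hband
  have hl : Int.land ((m:Nat):Int) ((m-1 : Nat):Int) = ((m &&& (m-1) : Nat) : Int) := rfl
  rw [hl] at hband
  have hn : m &&& (m - 1) = 0 := by exact_mod_cast hband
  obtain ⟨k, hk⟩ := pvPow2Char m hm hn
  exact ⟨k, by rw [hk]; push_cast; ring⟩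

-- ===== the xor-accumulating fold =====
def pvXorStep (acc : Int) (p : List Int) : Int :=
  match p with
  | [a, b] => PySem.Int.bor acc (PySem.Int.bxor a b)
  | _ => acc

def pvMaskOf (g : List Int) : Int := (PySem.List.combinations g 2).foldl pvXorStep 0

-- bits already absorbed stay absorbed
theorem pvMaskFoldPreserve (L : List (List Int)) (acc x : Int)
    (h : PySem.Int.band x acc = x) : PySem.Int.band x (L.foldl pvXorStep acc) = x := by
  induction L generalizing acc with
  | nil => exact h
  | cons p rest ih =>
    rcases p with _ | ⟨a, _ | ⟨b, _ | ⟨c, t⟩⟩⟩ <;> simp only [List.foldl, pvXorStep] <;>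
      first
        | exact ih acc h
        | exact ih _ (pvBandMono _ h)

-- every pair's xor is absorbed into the final mask
theorem pvMaskFoldAbsorb (L : List (List Int)) (acc : Int) {a b : Int} (hmem : [a, b] ∈ L) :
    PySem.Int.band (PySem.Int.bxor a b) (L.foldl pvXorStep acc) = PySem.Int.bxor a b := by
  induction L generalizing acc with
  | nil => cases hmem
  | cons p rest ih =>
    rcases List.mem_cons.mp hmem with rfl | hmem'
    · simp only [List.foldl, pvXorStep]
      exact pvMaskFoldPreserve rest _ _ (pvBandBorSelf _ _)
    · rcases p with _ | ⟨a', _ | ⟨b', _ | ⟨c', t⟩⟩⟩ <;> simp only [List.foldl, pvXorStep] <;>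
        exact ih _ hmem'

-- if every pair's xor avoids v, the mask avoids v
theorem pvMaskFoldDisjoint (L : List (List Int)) (acc v : Int)
    (h : ∀ a b : Int, [a, b] ∈ L → PySem.Int.band (PySem.Int.bxor a b) v = 0)
    (hacc : PySem.Int.band acc v = 0) : PySem.Int.band (L.foldl pvXorStep acc) v = 0 := by
  induction L generalizing acc with
  | nil => exact hacc
  | cons p rest ih =>
    have hrest : ∀ a b : Int, [a, b] ∈ rest → PySem.Int.band (PySem.Int.bxor a b) v = 0 :=
      fun a b hm => h a b (List.mem_cons_of_mem _ hm)
    rcases p with _ | ⟨a', _ | ⟨b', _ | ⟨c', t⟩⟩⟩ <;> simp only [List.foldl, pvXorStep] <;>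
      first
        | exact ih _ hrest hacc
        | exact ih _ hrest (by
            rw [pvBandBorDistrib, hacc, h a' b' (by simp)]
            simp)

-- if every pair's xor lies in [0, 2^k), the mask does
theorem pvMaskFoldBounds (L : List (List Int)) (acc : Int) (k : Nat)
    (h : ∀ a b : Int, [a, b] ∈ L → 0 ≤ PySem.Int.bxor a b ∧ PySem.Int.bxor a b < (2:Int)^k)
    (hacc : 0 ≤ acc ∧ acc < (2:Int)^k) :
    0 ≤ L.foldl pvXorStep acc ∧ L.foldl pvXorStep acc < (2:Int)^k := by
  induction L generalizing acc with
  | nil => exact hacc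
  | cons p rest ih =>
    have hrest : ∀ a b : Int, [a, b] ∈ rest → 0 ≤ PySem.Int.bxor a b ∧ PySem.Int.bxor a b < (2:Int)^k :=
      fun a b hm => h a b (List.mem_cons_of_mem _ hm)
    rcases p with _ | ⟨a', _ | ⟨b', _ | ⟨c', t⟩⟩⟩ <;> simp only [List.foldl, pvXorStep] <;>
      first
        | exact ih _ hrest hacc
        | exact ih _ hrest (by
            have hab := h a' b' (by simp)
            exact pvBorClosure hacc.1 hacc.2 hab.1 hab.2)

-- membership in the exp set built by the port, for mask = 2^j - 1
theorem pvExpMem (base : Int) (j : Nat) (x : Int) :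
    (x ∈ (PySem.List.pyRange 0 ((2:Int)^j - 1 + 1) 1).foldl
      (fun s c => if PySem.Int.band c (Int.not ((2:Int)^j - 1)) == 0
        then PySem.Set.add s (PySem.Int.bor base c) else s)
      (PySem.Set.empty : PySem.Set Int))
    ↔ ∃ c : Int, 0 ≤ c ∧ c < (2:Int)^j ∧ x = PySem.Int.bor base c := by
  have hcongr : (PySem.List.pyRange 0 ((2:Int)^j - 1 + 1) 1).foldl
      (fun s c => if PySem.Int.band c (Int.not ((2:Int)^j - 1)) == 0
        then PySem.Set.add s (PySem.Int.bor base c) else s)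
      (PySem.Set.empty : PySem.Set Int)
      = (PySem.List.pyRange 0 ((2:Int)^j - 1 + 1) 1).foldl
      (fun s c => PySem.Set.add s (PySem.Int.bor base c)) (PySem.Set.empty : PySem.Set Int) := by
    apply PySem.List.foldl_congr_mem
    intro acc c hc
    have hc' := PySem.List.mem_pyRange_one.mp hc
    have : PySem.Int.band c (Int.not ((2:Int)^j - 1)) = 0 :=
      pvBandNotMask hc'.1 (by have := hc'.2; omega)
    simp [this]
  rw [hcongr, PySem.Set.mem_foldl_add]
  constructor
  · rintro (h | ⟨c, hc, rfl⟩)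
    · cases h
    · have hc' := PySem.List.mem_pyRange_one.mp hc
      exact ⟨c, hc'.1, by have := hc'.2; omega, rfl⟩
  · rintro ⟨c, h0, hlt, rfl⟩
    exact Or.inr ⟨c, PySem.List.mem_pyRange_one.mpr ⟨h0, by omega⟩, rfl⟩

-- two distinct members of a list form a length-2 sublist in one of the two orders
theorem pvSubPair {x y : Int} {g : List Int} (hx : x ∈ g) (hy : y ∈ g) (hne : x ≠ y) :
    [x, y].Sublist g ∨ [y, x].Sublist g := by
  induction g with
  | nil => cases hx
  | cons h t ih =>
    rcases List.mem_cons.mp hx with rfl | hx'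
    · left
      rcases List.mem_cons.mp hy with rfl | hy'
      · exact absurd rfl hne
      · exact List.cons_sublist_cons.mpr (List.singleton_sublist.mpr hy')
    · rcases List.mem_cons.mp hy with rfl | hy'
      · right
        exact List.cons_sublist_cons.mpr (List.singleton_sublist.mpr hx')
      · rcases ih hx' hy' with h1 | h1
        · exact Or.inl (h1.cons _)
        · exact Or.inr (h1.cons _)

-- nodup sublists of a nodup list with the same members are equal
theorem pvSublistEq {l g1 g2 : List Int} (hl : l.Nodup) (h1 : g1.Sublist l) (h2 : g2.Sublist l)
    (hmem : ∀ x, x ∈ g1 ↔ x ∈ g2) : g1 = g2 := by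
  induction l generalizing g1 g2 with
  | nil =>
    rw [List.sublist_nil.mp h1, List.sublist_nil.mp h2]
  | cons a t ih =>
    have ht : t.Nodup := (List.nodup_cons.mp hl).2
    have ha : a ∉ t := (List.nodup_cons.mp hl).1
    cases h1 with
    | cons _ h1' =>
      cases h2 with
      | cons _ h2' => exact ih ht h1' h2' hmem
      | cons₂ _ h2' =>
        exfalso
        have : a ∈ g1 := (hmem a).mpr (by simp)
        exact ha (h1'.mem this)
    | cons₂ _ h1' =>
      cases h2 with
      | cons _ h2' =>
        exfalso
        have : a ∈ g2 := (hmem a).mp (by simp)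
        exact ha (h2'.mem this)
      | cons₂ _ h2' =>
        congr 1
        apply ih ht h1' h2'
        intro x
        constructor
        · intro hx
          have := (hmem x).mp (by simp [hx])
          rcases List.mem_cons.mp this with rfl | h
          · exact absurd (h1'.mem hx) ha
          · exact h
        · intro hx
          have := (hmem x).mpr (by simp [hx])
          rcases List.mem_cons.mp this with rfl | h
          · exact absurd (h2'.mem hx) ha
          · exact h

-- the combinations list of a nodup list is nodup
theorem pvNodupCombinations {l : List Int} (hl : l.Nodup) (r : Nat) :
    (PySem.List.combinations l r).Nodup := by
  induction l generalizing r with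
  | nil =>
    cases r with
    | zero => simp [PySem.List.combinations_zero]
    | succ r' => simp [PySem.List.combinations_nil_succ]
  | cons a t ih =>
    cases r with
    | zero => simp [PySem.List.combinations_zero]
    | succ r' =>
      rw [PySem.List.combinations_cons_succ]
      have ht : t.Nodup := (List.nodup_cons.mp hl).2
      have ha : a ∉ t := (List.nodup_cons.mp hl).1
      apply List.Nodup.append
      · exact (ih ht r').map (fun x y h => by simpa using h)
      · exact ih ht (r' + 1)
      · intro c hc1 hc2
        obtain ⟨c', _, rfl⟩ := List.mem_map.mp hc1
        have hsub := (PySem.List.mem_combinations_iff _ _ _).mp hc2 |>.1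
        exact ha (hsub.mem (by simp))

-- ===== interval list =====
def pvIv (b : Int) (s : Nat) : List Int := (List.range s).map (fun d : Nat => b + (d : Int))

theorem pvIvMem (b : Int) (s : Nat) (x : Int) : x ∈ pvIv b s ↔ b ≤ x ∧ x < b + (s : Int) := by
  unfold pvIv
  simp only [List.mem_map, List.mem_range]
  constructor
  · rintro ⟨d, hd, rfl⟩
    omega
  · rintro ⟨h1, h2⟩
    exact ⟨(x - b).toNat, by omega, by omega⟩

theorem pvIvNodup (b : Int) (s : Nat) : (pvIv b s).Nodup := by
  unfold pvIv
  exact (List.nodup_range).map (fun x y h => by omega)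

theorem pvIvLength (b : Int) (s : Nat) : (pvIv b s).length = s := by simp [pvIv]
theorem pvValidReduce {k : Nat} (hk : 1 ≤ k) {g : List Int} (hlen : g.length = 2^k) (n : Int) :
    is_valid g n =
      (if !pvIsPow2 (pvMaskOf g + 1) then false
       else PySem.Set.equal (PySem.Set.ofList g)
         ((PySem.List.pyRange 0 (pvMaskOf g + 1) 1).foldl
           (fun s c => if PySem.Int.band c (Int.not (pvMaskOf g)) == 0
             then PySem.Set.add s (PySem.Int.bor (PySem.List.pyGetD g 0 0) c) else s)
           PySem.Set.empty)) := by
  have hcast : ((g.length : Nat) : Int) = (2:Int)^k := by rw [hlen]; push_cast; ring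
  have hne1 : ((g.length : Nat) : Int) ≠ 1 := by
    rw [hcast]
    have h2 : (2:Int)^1 ≤ (2:Int)^k := pow_le_pow_right₀ (by omega) hk
    simp at h2
    omega
  have hsize : pvIsPow2 ((PySem.List.len g)) = true := by
    rw [PySem.List.len_eq, hcast]
    exact pvIsPow2True k
  simp only [is_valid]
  rw [hsize]
  simp only [Bool.not_true, Bool.false_eq_true, if_false]
  have hbeq : ((PySem.List.len g) == 1) = false := by
    rw [PySem.List.len_eq]
    simpa using hne1
  rw [hbeq]
  simp only [Bool.and_false, Bool.false_eq_true, if_false]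
  rfl

-- the heart: a nodup group of size 2^k (k ≥ 1) is accepted by is_valid exactly when its
-- member set is the aligned run of 2^k consecutive integers led by its first element
theorem pvValidChar {k : Nat} (hk : 1 ≤ k) {g : List Int} (n : Int) (hg : g.Nodup)
    (hlen : g.length = 2^k) :
    (is_valid g n = true) ↔
      (PySem.Int.mod (PySem.List.pyGetD g 0 0) ((2:Int)^k) = 0 ∧
       ∀ x, x ∈ g ↔ (PySem.List.pyGetD g 0 0 ≤ x ∧ x < PySem.List.pyGetD g 0 0 + (2:Int)^k)) := by
  set base := PySem.List.pyGetD g 0 0 with hbase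
  rw [pvValidReduce hk hlen n]
  constructor
  · -- forward: valid ⇒ aligned run
    intro hval
    by_cases hp : pvIsPow2 (pvMaskOf g + 1) = true
    swap
    · rw [if_pos (by simp [hp])] at hval
      cases hval
    rw [if_neg (by simp [hp])] at hval
    obtain ⟨j, hj⟩ := pvIsPow2Char hp
    have hmask : pvMaskOf g = (2:Int)^j - 1 := by linarith
    rw [hmask] at hval
    have hmem0 : ∀ x : Int, x ∈ g ↔ ∃ c : Int, 0 ≤ c ∧ c < (2:Int)^j ∧ x = PySem.Int.bor base c := by
      intro x
      have h1 := (PySem.Set.equal_iff _ _).mp hval x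
      rw [PySem.Set.mem_ofList, pvExpMem base j x] at h1
      exact h1
    have hdisj : PySem.Int.band (pvMaskOf g) base = 0 := by
      apply pvMaskFoldDisjoint
      · intro a b hab
        have hsub := (PySem.List.mem_combinations_iff _ _ _).mp hab |>.1
        have ha : a ∈ g := hsub.mem (by simp)
        have hb : b ∈ g := hsub.mem (by simp)
        obtain ⟨ca, _, _, rfl⟩ := (hmem0 a).mp ha
        obtain ⟨cb, _, _, rfl⟩ := (hmem0 b).mp hb
        exact pvXorBorBandSelf base ca cb
      · rw [PySem.Int.band_comm, PySem.Int.band_zero]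
    have hdvd : ((2:Int)^j) ∣ base := by
      rw [← PySem.Int.mod_eq_zero_iff_dvd, ← pvBandMask, PySem.Int.band_comm, ← hmask]
      exact hdisj
    have hiv : ∀ x : Int, x ∈ g ↔ (base ≤ x ∧ x < base + (2:Int)^j) := by
      intro x
      rw [hmem0 x]
      constructor
      · rintro ⟨c, h0, hlt, rfl⟩
        rw [pvBorAdd hdvd h0 hlt]
        omega
      · rintro ⟨h1, h2⟩
        exact ⟨x - base, by omega, by omega, by rw [pvBorAdd hdvd (by omega) (by omega)]; ring⟩
    have hperm : g.Perm (pvIv base (2^j)) := by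
      rw [List.perm_ext_iff_of_nodup hg (pvIvNodup _ _)]
      intro x
      rw [hiv x, pvIvMem]
      have : (((2:Nat)^j : Nat) : Int) = (2:Int)^j := by push_cast; ring
      rw [this]
    have hlj : (2:Nat)^k = 2^j := by
      rw [← hlen, hperm.length_eq, pvIvLength]
    have hkj : k = j := Nat.pow_right_injective (by omega) hlj
    subst hkj
    exact ⟨(PySem.Int.mod_eq_zero_iff_dvd _ _).mpr hdvd, hiv⟩
  · -- backward: aligned run ⇒ valid
    rintro ⟨hmod, hiv⟩
    have hdvd : ((2:Int)^k) ∣ base := (PySem.Int.mod_eq_zero_iff_dvd _ _).mp hmod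
    have hpow_pos : (0:Int) < 2^k := by positivity
    -- mask value
    have hbounds : 0 ≤ pvMaskOf g ∧ pvMaskOf g < (2:Int)^k := by
      apply pvMaskFoldBounds
      · intro a b hab
        have hsub := (PySem.List.mem_combinations_iff _ _ _).mp hab |>.1
        have ha := (hiv a).mp (hsub.mem (by simp))
        have hb := (hiv b).mp (hsub.mem (by simp))
        have hae : a = base + (a - base) := by ring
        have hbe : b = base + (b - base) := by ring
        rw [hae, hbe, pvXorShift hdvd (by omega) (by omega) (by omega) (by omega)]
        exact pvBxorClosure (by omega) (by omega) (by omega) (by omega)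
      · exact ⟨le_refl 0, hpow_pos⟩
    have hallbits : ∀ i < k, PySem.Int.band ((2:Int)^i) (pvMaskOf g) = (2:Int)^i := by
      intro i hik
      have hpi : (2:Int)^i < (2:Int)^k := by
        exact_mod_cast pow_lt_pow_right₀ (by omega : (1:Int) < 2) hik
      have hpi0 : (0:Int) < 2^i := by positivity
      have hx : base ∈ g := (hiv base).mpr ⟨le_refl _, by omega⟩
      have hy : base + 2^i ∈ g := (hiv _).mpr ⟨by omega, by omega⟩
      have hxor : PySem.Int.bxor base (base + 2^i) = (2:Int)^i := by
        have h := pvXorShift (a := base) (d1 := 0) (d2 := (2:Int)^i) hdvd (le_refl 0)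
          hpow_pos (le_of_lt hpi0) hpi
        rw [add_zero] at h
        rw [h, PySem.Int.bxor_comm, PySem.Int.bxor_zero]
      rcases pvSubPair hx hy (by omega) with hs | hs
      · have hmem : [base, base + 2^i] ∈ PySem.List.combinations g 2 :=
          (PySem.List.mem_combinations_iff _ _ _).mpr ⟨hs, rfl⟩
        have := pvMaskFoldAbsorb (PySem.List.combinations g 2) 0 hmem
        rw [hxor] at this
        exact this
      · have hmem : [base + 2^i, base] ∈ PySem.List.combinations g 2 :=
          (PySem.List.mem_combinations_iff _ _ _).mpr ⟨hs, rfl⟩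
        have := pvMaskFoldAbsorb (PySem.List.combinations g 2) 0 hmem
        rw [PySem.Int.bxor_comm, hxor] at this
        exact this
    have hmask : pvMaskOf g = (2:Int)^k - 1 := pvAllBitsSet hbounds.1 hbounds.2 hallbits
    rw [hmask]
    have hp : pvIsPow2 ((2:Int)^k) = true := by
      exact pvIsPow2True k
    rw [if_neg (by simp [show (2:Int)^k - 1 + 1 = (2:Int)^k by ring, hp])]
    rw [PySem.Set.equal_iff]
    intro x
    rw [PySem.Set.mem_ofList, pvExpMem base k x, hiv x]
    constructor
    · rintro ⟨h1, h2⟩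
      exact ⟨x - base, by omega, by omega, by rw [pvBorAdd hdvd (by omega) (by omega)]; ring⟩
    · rintro ⟨c, h0, hlt, rfl⟩
      rw [pvBorAdd hdvd h0 hlt]
      omega

-- a singleton group is always valid
theorem pvValidSingleton (x n : Int) : is_valid [x] n = true := by
  simp only [is_valid]
  have h2 : PySem.List.combinations [x] 2 = ([] : List (List Int)) := by
    have h3 : PySem.List.combinations ([] : List Int) 1 = [] :=
      PySem.List.combinations_nil_succ (r := 0)
    have h4 : PySem.List.combinations ([] : List Int) 2 = [] :=
      PySem.List.combinations_nil_succ (r := 1)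
    rw [PySem.List.combinations_cons_succ, h3, h4]
    simp
  rw [h2]
  norm_num [PySem.List.len_eq]
  decide

-- Python's tuple-key sort, named: any strictly lex-increasing rearrangement is the result
theorem pvSorted2Eq {α : Type} (xs ys : List α) (k1 k2 : α → Int) (hperm : ys.Perm xs)
    (hpw : ys.Pairwise (fun a b => k1 a < k1 b ∨ (k1 a = k1 b ∧ k2 a < k2 b))) :
    PySem.List.sorted2 xs k1 k2 = ys := by
  have hcmp : PySem.List.sorted2 xs k1 k2 =
      PySem.List.sorted xs (fun x => toLex (k1 x, k2 x)) := by
    show List.foldl _ [] xs = List.foldl _ [] xs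
    congr 1
    funext acc x
    congr 1
    funext a b
    show (decide (k1 a < k1 b) || (!decide (k1 b < k1 a) && decide (k2 a < k2 b)))
      = decide (toLex (k1 a, k2 a) < toLex (k1 b, k2 b))
    rw [show decide (toLex (k1 a, k2 a) < toLex (k1 b, k2 b))
        = decide (k1 a < k1 b ∨ (k1 a = k1 b ∧ k2 a < k2 b)) from
      decide_eq_decide.mpr Prod.Lex.toLex_lt_toLex]
    rcases lt_trichotomy (k1 a) (k1 b) with h | h | h
    · simp [h, not_lt_of_gt h]
    · simp [h]
    · simp [not_lt_of_gt h, h.ne', h]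
  rw [hcmp]
  apply PySem.List.sorted_eq_of_perm_of_pairwise_lt _ _ _ hperm
  refine hpw.imp ?_
  intro a b h
  exact Prod.Lex.toLex_lt_toLex.mpr (by simpa using h)

-- ===== candidate lists =====
def pvGreedyStep (st : List (List Int) × PySem.Set Int) (g : List Int) :
    List (List Int) × PySem.Set Int :=
  if g.any (fun m => !(PySem.Set.contains st.2 m)) then (st.1 ++ [g], PySem.Set.update st.2 g)
  else st

def pvF (targets : List Int) (n : Int) (r : Nat) : List (List Int) :=
  (PySem.List.combinations targets r).filter (fun g => is_valid g n)

def pvCandsB (targets : List Int) (k : Nat) : List (List Int) :=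
  ((PySem.List.sorted (pvStarts (PySem.Set.ofList targets) ((2:Int)^k)) (fun t => t)).filter
    (fun b => PySem.List.pyGetD (pvBlock targets b ((2:Int)^k)) 0 0 == b)).map
    (fun b => pvBlock targets b ((2:Int)^k))

def pvC1B (targets : List Int) : List (List Int) :=
  (PySem.List.sorted (PySem.Set.ofList targets) (fun t => t)).map (fun t => [t])

def pvCandPred (targets : List Int) (k : Nat) (g : List Int) : Prop :=
  ∃ b : Int, b ∈ targets ∧ PySem.Int.mod b ((2:Int)^k) = 0 ∧
    (∀ x : Int, b ≤ x ∧ x < b + (2:Int)^k → x ∈ targets) ∧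
    g = pvBlock targets b ((2:Int)^k) ∧ PySem.List.pyGetD g 0 0 = b

-- block membership
theorem pvBlockMem (targets : List Int) (b s x : Int) :
    x ∈ pvBlock targets b s ↔ x ∈ targets ∧ (b ≤ x ∧ x < b + s) := by
  unfold pvBlock
  simp [List.mem_filter]

theorem pvBlockSublist (targets : List Int) (b s : Int) : (pvBlock targets b s).Sublist targets :=
  List.filter_sublist

-- first element of a nonempty list via pyGetD
theorem pvHeadMem {g : List Int} (h : g ≠ []) : PySem.List.pyGetD g 0 0 ∈ g := by
  cases g with
  | nil => exact absurd rfl h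
  | cons a t => rw [PySem.List.pyGetD_zero_cons]; exact List.mem_cons_self

theorem pvBlockLength {targets : List Int} (hnd : targets.Nodup) {b : Int} {k : Nat}
    (hall : ∀ x : Int, b ≤ x ∧ x < b + (2:Int)^k → x ∈ targets) :
    (pvBlock targets b ((2:Int)^k)).length = 2^k := by
  have hperm : (pvBlock targets b ((2:Int)^k)).Perm (pvIv b (2^k)) := by
    rw [List.perm_ext_iff_of_nodup ((pvBlockSublist targets b _).nodup hnd) (pvIvNodup _ _)]
    intro x
    rw [pvBlockMem, pvIvMem]
    have hc : (((2:Nat)^k : Nat) : Int) = (2:Int)^k := by push_cast; ring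
    rw [hc]
    constructor
    · rintro ⟨_, h2⟩; exact h2
    · intro h2; exact ⟨hall x h2, h2⟩
  rw [hperm.length_eq, pvIvLength]

-- membership in A's per-size candidate list
theorem pvMemF {targets : List Int} (hnd : targets.Nodup) {k : Nat} (hk : 1 ≤ k) (n : Int)
    (g : List Int) : g ∈ pvF targets n (2^k) ↔ pvCandPred targets k g := by
  unfold pvF pvCandPred
  rw [List.mem_filter, PySem.List.mem_combinations_iff]
  constructor
  · rintro ⟨⟨hsub, hlen⟩, hval⟩
    have hg : g.Nodup := hsub.nodup hnd
    have hne : g ≠ [] := by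
      intro h
      rw [h] at hlen
      simp at hlen
      have := Nat.two_pow_pos k
      omega
    obtain ⟨hmod, hiv⟩ := (pvValidChar hk n hg hlen).mp hval
    set b := PySem.List.pyGetD g 0 0 with hb
    have hbg : b ∈ g := pvHeadMem hne
    refine ⟨b, hsub.mem hbg, hmod, ?_, ?_, rfl⟩
    · intro x hx
      exact hsub.mem ((hiv x).mpr hx)
    · apply pvSublistEq hnd hsub (pvBlockSublist targets b _)
      intro x
      rw [pvBlockMem, hiv x]
      constructor
      · intro h2
        exact ⟨hsub.mem ((hiv x).mpr h2), h2⟩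
      · rintro ⟨_, h2⟩; exact h2
  · rintro ⟨b, hbt, hmod, hall, rfl, hhead⟩
    have hnodup : (pvBlock targets b ((2:Int)^k)).Nodup := (pvBlockSublist targets b _).nodup hnd
    have hlen := pvBlockLength hnd hall
    have hiv : ∀ x, x ∈ pvBlock targets b ((2:Int)^k) ↔
        (PySem.List.pyGetD (pvBlock targets b ((2:Int)^k)) 0 0 ≤ x ∧
         x < PySem.List.pyGetD (pvBlock targets b ((2:Int)^k)) 0 0 + (2:Int)^k) := by
      intro x
      rw [hhead, pvBlockMem]
      constructor
      · rintro ⟨_, h2⟩; exact h2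
      · intro h2; exact ⟨hall x h2, h2⟩
    refine ⟨⟨pvBlockSublist targets b _, hlen⟩, ?_⟩
    exact (pvValidChar hk n hnodup hlen).mpr ⟨by rw [hhead]; exact hmod, hiv⟩

-- membership in B's per-size candidate list
theorem pvMemCB (targets : List Int) (k : Nat) (hk : 1 ≤ k) (g : List Int) :
    g ∈ pvCandsB targets k ↔ pvCandPred targets k g := by
  unfold pvCandsB pvCandPred
  rw [List.mem_map]
  constructor
  · rintro ⟨b, hb, rfl⟩
    rw [List.mem_filter] at hb
    obtain ⟨hbs, hhead⟩ := hb
    rw [PySem.List.mem_sorted] at hbs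
    unfold pvStarts at hbs
    rw [List.mem_filter] at hbs
    obtain ⟨hbt, hcond⟩ := hbs
    rw [PySem.Set.mem_ofList] at hbt
    simp only [Bool.and_eq_true, beq_iff_eq, List.all_eq_true] at hcond
    obtain ⟨hmod, hall⟩ := hcond
    refine ⟨b, hbt, hmod, ?_, rfl, by simpa using hhead⟩
    intro x hx
    by_cases hxb : x = b
    · rw [hxb]; exact hbt
    · have hd : x - b ∈ PySem.List.pyRange 1 ((2:Int)^k) 1 :=
        PySem.List.mem_pyRange_one.mpr ⟨by omega, by omega⟩
      have := hall _ hd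
      rw [PySem.Set.contains_iff, PySem.Set.mem_ofList] at this
      simpa [show b + (x - b) = x by ring] using this
  · rintro ⟨b, hbt, hmod, hall, rfl, hhead⟩
    refine ⟨b, ?_, rfl⟩
    rw [List.mem_filter]
    constructor
    · rw [PySem.List.mem_sorted]
      unfold pvStarts
      rw [List.mem_filter]
      constructor
      · rw [PySem.Set.mem_ofList]; exact hbt
      · simp only [Bool.and_eq_true, beq_iff_eq, List.all_eq_true]
        refine ⟨hmod, ?_⟩
        intro d hd
        have hd' := PySem.List.mem_pyRange_one.mp hd
        rw [PySem.Set.contains_iff, PySem.Set.mem_ofList]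
        exact hall (b + d) ⟨by omega, by omega⟩
    · simpa using hhead

-- the sort keys of A
def pvKeyLen (g : List Int) : Int := -(PySem.List.len g)
def pvKeyHead (g : List Int) : Int := PySem.List.pyGetD g 0 0
def pvLexR (a b : List Int) : Prop :=
  pvKeyLen a < pvKeyLen b ∨ (pvKeyLen a = pvKeyLen b ∧ pvKeyHead a < pvKeyHead b)

theorem pvCBLen {targets : List Int} (hnd : targets.Nodup) {k : Nat} (hk : 1 ≤ k)
    {g : List Int} (hg : g ∈ pvCandsB targets k) : PySem.List.len g = (((2:Nat)^k : Nat) : Int) := by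
  obtain ⟨b, _, _, hall, rfl, _⟩ := (pvMemCB targets k hk g).mp hg
  rw [PySem.List.len_eq, pvBlockLength hnd hall]

theorem pvStartsNodupSorted (targets : List Int) (s : Int) :
    (PySem.List.sorted (pvStarts (PySem.Set.ofList targets) s) (fun t => t)).Nodup := by
  have h1 : (pvStarts (PySem.Set.ofList targets) s).Nodup :=
    (PySem.Set.nodup_ofList targets).filter _
  exact (PySem.List.sorted_perm _ _ _).nodup_iff.mpr h1

theorem pvCBPairwise {targets : List Int} (hnd : targets.Nodup) {k : Nat} (hk : 1 ≤ k) :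
    (pvCandsB targets k).Pairwise pvLexR := by
  unfold pvCandsB
  rw [List.pairwise_map]
  have hlt : (PySem.List.sorted (pvStarts (PySem.Set.ofList targets) ((2:Int)^k)) (fun t => t)).Pairwise (· < ·) := by
    have hle := PySem.List.sorted_pairwise (pvStarts (PySem.Set.ofList targets) ((2:Int)^k)) (fun t => t)
    have hnd := pvStartsNodupSorted targets ((2:Int)^k)
    exact (hle.and hnd).imp (fun h => lt_of_le_of_ne h.1 h.2)
  have hflt := hlt.filter (fun b => PySem.List.pyGetD (pvBlock targets b ((2:Int)^k)) 0 0 == b)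
  apply List.Pairwise.imp_of_mem ?_ hflt
  intro b1 b2 h1 h2 hbb
  have hm1 : pvBlock targets b1 ((2:Int)^k) ∈ pvCandsB targets k := List.mem_map.mpr ⟨b1, h1, rfl⟩
  have hm2 : pvBlock targets b2 ((2:Int)^k) ∈ pvCandsB targets k := List.mem_map.mpr ⟨b2, h2, rfl⟩
  rw [List.mem_filter] at h1 h2
  have e1 : PySem.List.pyGetD (pvBlock targets b1 ((2:Int)^k)) 0 0 = b1 := by simpa using h1.2
  have e2 : PySem.List.pyGetD (pvBlock targets b2 ((2:Int)^k)) 0 0 = b2 := by simpa using h2.2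
  right
  constructor
  · unfold pvKeyLen
    rw [pvCBLen hnd hk hm1, pvCBLen hnd hk hm2]
  · unfold pvKeyHead
    rw [e1, e2]
    exact hbb

theorem pvC1Pairwise (targets : List Int) : (pvC1B targets).Pairwise pvLexR := by
  unfold pvC1B
  rw [List.pairwise_map]
  have hlt := PySem.List.sorted_ofList_pairwise_lt (xs := targets)
  apply hlt.imp
  intro a b h
  right
  refine ⟨rfl, ?_⟩
  unfold pvKeyHead
  simpa [PySem.List.pyGetD_zero_cons] using h

theorem pvC1Len {targets g : List Int} (hg : g ∈ pvC1B targets) : PySem.List.len g = 1 := by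
  obtain ⟨t, _, rfl⟩ := List.mem_map.mp hg
  simp [PySem.List.len_eq]

theorem pvCBNodup (targets : List Int) (k : Nat) : (pvCandsB targets k).Nodup := by
  unfold pvCandsB
  apply (List.nodup_map_iff_inj_on ((pvStartsNodupSorted targets ((2:Int)^k)).filter _)).mpr
  intro x hx y hy hxy
  rw [List.mem_filter] at hx hy
  have e1 : PySem.List.pyGetD (pvBlock targets x ((2:Int)^k)) 0 0 = x := by simpa using hx.2
  have e2 : PySem.List.pyGetD (pvBlock targets y ((2:Int)^k)) 0 0 = y := by simpa using hy.2
  rw [← e1, ← e2, hxy]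

theorem pvFNodup {targets : List Int} (hnd : targets.Nodup) (n : Int) (r : Nat) :
    (pvF targets n r).Nodup := (pvNodupCombinations hnd r).filter _

theorem pvPermFCB {targets : List Int} (hnd : targets.Nodup) (n : Int) {k : Nat} (hk : 1 ≤ k) :
    (pvCandsB targets k).Perm (pvF targets n (2^k)) := by
  rw [List.perm_ext_iff_of_nodup (pvCBNodup targets k) (pvFNodup hnd n _)]
  intro g
  rw [pvMemCB targets k hk g, pvMemF hnd hk n g]

theorem pvF1Eq (targets : List Int) (n : Int) : pvF targets n 1 = targets.map (fun x => [x]) := by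
  unfold pvF
  rw [PySem.List.combinations_one]
  apply List.filter_eq_self.mpr
  intro g hg
  obtain ⟨x, _, rfl⟩ := List.mem_map.mp hg
  exact pvValidSingleton x n

theorem pvPermC1 {targets : List Int} (hnd : targets.Nodup) (n : Int) :
    (pvC1B targets).Perm (pvF targets n 1) := by
  rw [pvF1Eq]
  unfold pvC1B
  apply List.Perm.map
  calc (PySem.List.sorted (PySem.Set.ofList targets) (fun t => t)).Perm (PySem.Set.ofList targets) :=
    PySem.List.sorted_perm _ _ _
  _ = targets := PySem.Set.ofList_eq_self_of_nodup targets hnd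

theorem pvLexROfLen {g1 g2 : List Int} (h : PySem.List.len g2 < PySem.List.len g1) :
    pvLexR g1 g2 := by
  left
  unfold pvKeyLen
  omega

-- the sorted candidate list of A equals B's per-size candidate lists in order
theorem pvSortedCandsEq {targets : List Int} (hnd : targets.Nodup) (n : Int) :
    PySem.List.sorted2 (pvF targets n 8 ++ pvF targets n 4 ++ pvF targets n 2 ++ pvF targets n 1)
      (fun g => -(PySem.List.len g)) (fun g => PySem.List.pyGetD g 0 0)
    = pvCandsB targets 3 ++ pvCandsB targets 2 ++ pvCandsB targets 1 ++ pvC1B targets := by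
  have h8 : (8:Nat) = 2^3 := by norm_num
  have h4 : (4:Nat) = 2^2 := by norm_num
  have h2 : (2:Nat) = 2^1 := by norm_num
  apply pvSorted2Eq
  · -- permutation
    rw [h8, h4, h2]
    exact ((((pvPermFCB hnd n (by omega : 1 ≤ 3)).append
      (pvPermFCB hnd n (by omega : 1 ≤ 2))).append
      (pvPermFCB hnd n (by omega : 1 ≤ 1))).append (pvPermC1 hnd n))
  · -- pairwise strict lexicographic order
    show (pvCandsB targets 3 ++ pvCandsB targets 2 ++ pvCandsB targets 1 ++ pvC1B targets).Pairwise pvLexR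
    have l3 : ∀ g ∈ pvCandsB targets 3, PySem.List.len g = ((2^3 : Nat) : Int) :=
      fun g hg => pvCBLen hnd (by omega) hg
    have l2 : ∀ g ∈ pvCandsB targets 2, PySem.List.len g = ((2^2 : Nat) : Int) :=
      fun g hg => pvCBLen hnd (by omega) hg
    have l1 : ∀ g ∈ pvCandsB targets 1, PySem.List.len g = ((2^1 : Nat) : Int) :=
      fun g hg => pvCBLen hnd (by omega) hg
    rw [List.pairwise_append]
    refine ⟨?_, ?_, ?_⟩
    · rw [List.pairwise_append]
      refine ⟨?_, ?_, ?_⟩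
      · rw [List.pairwise_append]
        refine ⟨pvCBPairwise hnd (by omega), pvCBPairwise hnd (by omega), ?_⟩
        intro a ha b hb
        exact pvLexROfLen (by rw [l3 a ha, l2 b hb]; norm_num)
      · exact pvCBPairwise hnd (by omega)
      · intro a ha b hb
        rcases List.mem_append.mp ha with h | h
        · exact pvLexROfLen (by rw [l3 a h, l1 b hb]; norm_num)
        · exact pvLexROfLen (by rw [l2 a h, l1 b hb]; norm_num)
    · exact pvC1Pairwise targets
    · intro a ha b hb
      have hlb : PySem.List.len b = 1 := pvC1Len hb
      rcases List.mem_append.mp ha with h | h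
      · rcases List.mem_append.mp h with h' | h'
        · exact pvLexROfLen (by rw [l3 a h', hlb]; norm_num)
        · exact pvLexROfLen (by rw [l2 a h', hlb]; norm_num)
      · exact pvLexROfLen (by rw [l1 a h, hlb]; norm_num)

-- once everything is covered, the greedy fold adds nothing
theorem pvFoldNoNew (L : List (List Int)) (st : List (List Int) × PySem.Set Int)
    (h : ∀ g ∈ L, ∀ m ∈ g, m ∈ st.2) : L.foldl pvGreedyStep st = st := by
  induction L with
  | nil => rfl
  | cons g rest ih =>
    have hany : (g.any (fun m => !(PySem.Set.contains st.2 m))) = false := by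
      rw [List.any_eq_false]
      intro m hm
      simp [PySem.Set.contains_iff, h g (by simp) m hm]
    have hstep : pvGreedyStep st g = st := by
      unfold pvGreedyStep
      rw [hany]
      simp
    rw [List.foldl_cons, hstep]
    exact ih (fun g' hg' => h g' (by simp [hg']))

-- A's greedy loop with break equals the plain greedy fold
theorem pvGreedyLoopAEq (targets : List Int) (L : List (List Int)) (cov : PySem.Set Int)
    (used : List (List Int)) (h : ∀ g ∈ L, ∀ m ∈ g, m ∈ targets) :
    greedyLoopA targets L cov used = (L.foldl pvGreedyStep (used, cov)).1 := by
  induction L generalizing cov used with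
  | nil => rfl
  | cons g rest ih =>
    show (let st := if g.any (fun m => !(PySem.Set.contains cov m)) then
            (used ++ [g], PySem.Set.update cov g) else (used, cov);
          if PySem.Set.equal st.2 (PySem.Set.ofList targets) then st.1
          else greedyLoopA targets rest st.2 st.1)
        = ((g :: rest).foldl pvGreedyStep (used, cov)).1
    have hstep : pvGreedyStep (used, cov) g =
        (if g.any (fun m => !(PySem.Set.contains cov m)) then
          (used ++ [g], PySem.Set.update cov g) else (used, cov)) := rfl
    rw [List.foldl_cons, ← hstep]
    by_cases hb : PySem.Set.equal (pvGreedyStep (used, cov) g).2 (PySem.Set.ofList targets) = true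
    · simp only [hstep] at hb ⊢
      rw [if_pos hb]
      rw [pvFoldNoNew]
      intro g' hg' m hm
      have := (PySem.Set.equal_iff _ _).mp hb m
      rw [PySem.Set.mem_ofList] at this
      exact this.mpr (h g' (by simp [hg']) m hm)
    · simp only [hstep] at hb ⊢
      rw [if_neg hb]
      rw [ih _ _ (fun g' hg' => h g' (by simp [hg']))]

-- B's size pass is the greedy fold over its candidate list
theorem pvSizeStepEq (targets : List Int) (k : Nat) (st : List (List Int) × PySem.Set Int) :
    pvSizeStep targets (PySem.Set.ofList targets) ((2:Int)^k) st
    = (pvCandsB targets k).foldl pvGreedyStep st := by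
  unfold pvSizeStep pvCandsB
  rw [List.foldl_map]
  rw [← PySem.List.foldl_if_eq_foldl_filter
    (p := fun b => PySem.List.pyGetD (pvBlock targets b ((2:Int)^k)) 0 0 == b)
    (f := fun st b => pvGreedyStep st (pvBlock targets b ((2:Int)^k)))]
  apply PySem.List.foldl_congr_mem
  intro st' b _
  cases h1 : (PySem.List.pyGetD (pvBlock targets b ((2:Int)^k)) 0 0 == b) <;>
    cases h2 : ((pvBlock targets b ((2:Int)^k)).any (fun m => !(PySem.Set.contains st'.2 m))) <;>
      simp [h1, h2, pvGreedyStep]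

-- B's singleton pass is the greedy fold over the singleton candidates
theorem pvFinEq (targets : List Int) (st : List (List Int) × PySem.Set Int) :
    (PySem.List.sorted (PySem.Set.ofList targets) (fun t => t)).foldl
      (fun st t => if !(PySem.Set.contains st.2 t) then (st.1 ++ [[t]], PySem.Set.add st.2 t)
        else st) st
    = (pvC1B targets).foldl pvGreedyStep st := by
  unfold pvC1B
  rw [List.foldl_map]
  apply PySem.List.foldl_congr_mem
  intro st' t _
  show (if !(PySem.Set.contains st'.2 t) then (st'.1 ++ [[t]], PySem.Set.add st'.2 t) else st')
      = pvGreedyStep st' [t]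
  unfold pvGreedyStep
  have hany : ([t].any (fun m => !(PySem.Set.contains st'.2 m)))
      = !(PySem.Set.contains st'.2 t) := by simp
  rw [hany]
  have hupd : PySem.Set.update st'.2 [t] = PySem.Set.add st'.2 t := rfl
  rw [hupd]

-- B as a single greedy fold
theorem pvAltShape (targets : List Int) (n : Int) :
    greedy_cover_alt targets n
    = ((pvCandsB targets 3 ++ pvCandsB targets 2 ++ pvCandsB targets 1 ++ pvC1B targets).foldl
        pvGreedyStep ([], PySem.Set.empty)).1 := by
  show ((PySem.List.sorted (PySem.Set.ofList targets) (fun t => t)).foldl _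
    (([8, 4, 2] : List Int).foldl _ ([], PySem.Set.empty))).1 = _
  simp only [List.foldl_cons, List.foldl_nil]
  rw [show (2:Int) = (2:Int)^1 by norm_num]
  rw [show (8:Int) = (2:Int)^3 by norm_num]
  rw [show (4:Int) = (2:Int)^2 by norm_num]
  rw [pvSizeStepEq, pvSizeStepEq, pvSizeStepEq, pvFinEq]
  rw [List.foldl_append, List.foldl_append, List.foldl_append]

theorem pvCandStep (targets : List Int) (n : Int) (cand : List (List Int)) (size : Int) :
    (if decide (PySem.List.len targets < size) then cand
     else (PySem.List.combinations targets size.toNat).foldl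
       (fun cand g => if is_valid g n then cand ++ [g] else cand) cand)
    = cand ++ pvF targets n size.toNat := by
  by_cases h : PySem.List.len targets < size
  · rw [if_pos (by simpa using h)]
    have hlt : targets.length < size.toNat := by
      rw [PySem.List.len_eq] at h
      omega
    unfold pvF
    rw [PySem.List.combinations_eq_nil_of_length_lt targets hlt]
    simp
  · rw [if_neg (by simpa using h)]
    rw [PySem.List.foldl_append_if_eq_filter]
    rfl

-- every member of every candidate of B's lists is a target
theorem pvMembersIn {targets : List Int} (hnd : targets.Nodup) :
    ∀ g ∈ pvCandsB targets 3 ++ pvCandsB targets 2 ++ pvCandsB targets 1 ++ pvC1B targets,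
      ∀ m ∈ g, m ∈ targets := by
  intro g hg m hm
  rcases List.mem_append.mp hg with h | h
  · have hcb : ∃ k, 1 ≤ k ∧ g ∈ pvCandsB targets k := by
      rcases List.mem_append.mp h with h' | h'
      · rcases List.mem_append.mp h' with h'' | h''
        · exact ⟨3, by omega, h''⟩
        · exact ⟨2, by omega, h''⟩
      · exact ⟨1, by omega, h'⟩
    obtain ⟨k, hk, hgk⟩ := hcb
    obtain ⟨b, _, _, _, rfl, _⟩ := (pvMemCB targets k hk g).mp hgk
    exact (pvBlockSublist targets b _).mem hm
  · obtain ⟨t, ht, rfl⟩ := List.mem_map.mp h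
    rw [PySem.List.mem_sorted, PySem.Set.mem_ofList] at ht
    simpa using (List.mem_singleton.mp hm) ▸ ht

-- ===== main equivalence =====
theorem pvMain {targets : List Int} (hnd : targets.Nodup) (n : Int) :
    greedy_cover targets n = greedy_cover_alt targets n := by
  show greedyLoopA targets
      (PySem.List.sorted2 (([8, 4, 2, 1] : List Int).foldl _ [])
        (fun g => -(PySem.List.len g)) (fun g => PySem.List.pyGetD g 0 0))
      PySem.Set.empty [] = _
  simp only [List.foldl_cons, List.foldl_nil]
  rw [pvCandStep, pvCandStep, pvCandStep, pvCandStep]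
  have ht8 : (8:Int).toNat = 8 := rfl
  have ht4 : (4:Int).toNat = 4 := rfl
  have ht2 : (2:Int).toNat = 2 := rfl
  have ht1 : (1:Int).toNat = 1 := rfl
  rw [ht8, ht4, ht2, ht1]
  rw [List.nil_append]
  rw [pvSortedCandsEq hnd n]
  rw [pvGreedyLoopAEq targets _ _ _ (pvMembersIn hnd)]
  rw [pvAltShape targets n]

-- ===== VERDICT (by name: the statement is the Claim_ definition above) =====
theorem greedy_cover_spec : Claim_equal_greedy_cover := by
  intro targets n _ hpre
  unfold Spec_greedy_cover
  unfold Pre_greedy_cover at hpre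
  exact pvMain hpre n
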